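-- pv_equiv track=rewrite | github.com/MinKyeom/KMK-DREAM | Programmers/lv3/숫자 게임.py | solution
-- ===== SOURCE A (Python) =====
-- from collections import deque
--
-- def solution(A, B):
--     A.sort()
--     B.sort()
--
--     A = deque(A)
--     B = deque(B)
--
--     result = 0
--
--     while A:
--         a = A.popleft()
--
--         while B:
--             b = B.popleft()
--
--             if b > a:
--                 result += 1
--                 break
--
--         if len(B) == 0:
--             break
--
--     return result
-- ===== SOURCE B (Python) =====
-- def solution(A, B):
--     # Backward single pass: pair each largest A with the current largest unused B.
--     # Same in-place sort side effect on A and B as the original.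
--     A.sort()
--     B.sort()
--     bs = iter(reversed(B))
--     b = next(bs, None)
--     count = 0
--     for a in reversed(A):
--         if b is not None and b > a:
--             count += 1
--             b = next(bs, None)
--     return count
-- ===== Notes on version B (the rewrite author's own statement) =====
-- stated objective: idiomatic
-- what changed: Replaced the forward nested pop-loop over two deques with a single backward two-pointer pass over the sorted lists (match the largest beatable pair, otherwise skip the largest A).
import Mathlib
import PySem

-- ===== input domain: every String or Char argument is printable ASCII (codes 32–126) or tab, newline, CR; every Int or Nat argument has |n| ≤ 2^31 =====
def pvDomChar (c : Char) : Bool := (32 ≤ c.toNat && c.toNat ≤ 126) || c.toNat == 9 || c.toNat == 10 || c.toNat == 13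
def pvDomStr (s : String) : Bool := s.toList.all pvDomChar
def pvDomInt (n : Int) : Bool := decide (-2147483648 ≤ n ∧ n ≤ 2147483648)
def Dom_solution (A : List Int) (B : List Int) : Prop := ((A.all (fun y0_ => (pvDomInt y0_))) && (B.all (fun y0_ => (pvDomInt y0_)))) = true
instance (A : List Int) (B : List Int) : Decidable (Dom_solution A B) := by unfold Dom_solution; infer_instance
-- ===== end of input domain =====

-- B replaces A's forward nested pop-loop over two deques with a single backward
-- two-pointer pass over the sorted lists (idiomatic; same cost). Both A and B sort
-- their list arguments in place; the equivalence proved is about the return value.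


-- ===== PORT A =====
-- inner `while B:` loop: pop b's until one with b > a (returns found-flag and remaining deque)
def pvInner (a : Int) : List Int → Bool × List Int
  | [] => (false, [])
  | b :: bs => if a < b then (true, bs) else pvInner a bs

-- outer `while A:` loop; after the inner loop, `if len(B) == 0: break`
def pvOuter : List Int → List Int → Int
  | [], _ => 0
  | a :: as, B =>
    let p := pvInner a B
    (if p.1 then 1 else 0) + (if p.2 = [] then 0 else pvOuter as p.2)

def solution (A : List Int) (B : List Int) : Int :=
  pvOuter (PySem.List.sorted A (fun x => x) false) (PySem.List.sorted B (fun x => x) false)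

-- ===== PORT B =====
-- one step of the `for a in reversed(A):` loop; state = (count, iterator over reversed(B))
def pvAltStep (st : Int × List Int) (a : Int) : Int × List Int :=
  match st.2 with
  | [] => st
  | b :: bs => if a < b then (st.1 + 1, bs) else st

def solution_alt (A : List Int) (B : List Int) : Int :=
  (((PySem.List.sorted A (fun x => x) false).reverse).foldl pvAltStep
    (0, (PySem.List.sorted B (fun x => x) false).reverse)).1

-- ===== PRECONDITION & SPEC =====
def Spec_solution (A : List Int) (B : List Int) (out : Int) : Prop := out = solution_alt A B
instance (A : List Int) (B : List Int) (out : Int) : Decidable (Spec_solution A B out) := by unfold Spec_solution; infer_instance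

-- ===== CLAIM (what is proved, stated in full; the proofs are below) =====
def Claim_equal_solution : Prop := ∀ (A : List Int) (B : List Int), Dom_solution A B → Spec_solution A B (solution A B)

-- ===== LEMMAS AND PROOFS =====

-- backward greedy on DESCENDING lists (the mathematical shape of B's loop)
def pvBack : List Int → List Int → Int
  | [], _ => 0
  | _ :: _, [] => 0
  | x :: as, y :: bs => if x < y then 1 + pvBack as bs else pvBack as (y :: bs)

theorem pvBack_nil_right (l : List Int) : pvBack l [] = 0 := by
  cases l <;> simp [pvBack]

theorem pvOuter_nil_right (l : List Int) : pvOuter l [] = 0 := by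
  cases l <;> simp [pvOuter, pvInner]

theorem pvInner_mem (a : Int) (B : List Int) : ∀ x ∈ (pvInner a B).2, x ∈ B := by
  induction B with
  | nil => simp [pvInner]
  | cons b bs ih =>
    intro x hx
    by_cases h : a < b
    · simp [pvInner, h] at hx; simp [hx]
    · simp only [pvInner, if_neg h] at hx
      exact List.mem_cons_of_mem _ (ih x hx)

theorem pvInner_false (a : Int) (B : List Int) (h : ∀ b ∈ B, b ≤ a) :
    pvInner a B = (false, []) := by
  induction B with
  | nil => rfl
  | cons b bs ih =>
    have hb : b ≤ a := h b (by simp)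
    simp only [pvInner, if_neg (not_lt.mpr hb)]
    exact ih (fun x hx => h x (List.mem_cons_of_mem _ hx))

theorem pvInner_true (a : Int) (B : List Int) (h : ∃ b ∈ B, a < b) :
    (pvInner a B).1 = true := by
  induction B with
  | nil => simp at h
  | cons b bs ih =>
    by_cases hb : a < b
    · simp [pvInner, hb]
    · simp only [pvInner, if_neg hb]
      rcases h with ⟨c, hc, hac⟩
      rcases List.mem_cons.1 hc with rfl | hc'
      · exact absurd hac hb
      · exact ih ⟨c, hc', hac⟩

theorem pvInner_append_of_false (a : Int) (B C : List Int)
    (h : (pvInner a B).1 = false) : pvInner a (B ++ C) = pvInner a C := by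
  induction B with
  | nil => simp
  | cons b bs ih =>
    by_cases hb : a < b
    · simp [pvInner, hb] at h
    · simp only [List.cons_append, pvInner, if_neg hb] at h ⊢
      exact ih h

theorem pvInner_append_of_true (a : Int) (B C : List Int)
    (h : (pvInner a B).1 = true) :
    pvInner a (B ++ C) = (true, (pvInner a B).2 ++ C) := by
  induction B with
  | nil => simp [pvInner] at h
  | cons b bs ih =>
    by_cases hb : a < b
    · simp [pvInner, hb]
    · simp only [List.cons_append, pvInner, if_neg hb] at h ⊢
      exact ih h

theorem pvInner_snd_nil_of_false (a : Int) (B : List Int)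
    (h : (pvInner a B).1 = false) : (pvInner a B).2 = [] := by
  induction B with
  | nil => rfl
  | cons b bs ih =>
    by_cases hb : a < b
    · simp [pvInner, hb] at h
    · simp only [pvInner, if_neg hb] at h ⊢
      exact ih h

-- `if l = [] then 0 else pvOuter as l` collapses, since pvOuter _ [] = 0
theorem pvOuter_cons (a : Int) (as B : List Int) :
    pvOuter (a :: as) B =
      (if (pvInner a B).1 then 1 else 0) + pvOuter as (pvInner a B).2 := by
  show (if (pvInner a B).1 then (1:Int) else 0) + (if (pvInner a B).2 = [] then 0 else pvOuter as (pvInner a B).2) = _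
  by_cases h : (pvInner a B).2 = []
  · rw [h, if_pos rfl, pvOuter_nil_right]
  · rw [if_neg h]

-- dropping a largest a (≥ every b) does not change the forward count
theorem pvDropMax (A2 : List Int) (x : Int) :
    ∀ B : List Int, (∀ b ∈ B, b ≤ x) → pvOuter (A2 ++ [x]) B = pvOuter A2 B := by
  induction A2 with
  | nil =>
    intro B h
    simp only [List.nil_append]
    rw [pvOuter_cons, pvInner_false x B h]
    simp [pvOuter]
  | cons a as ih =>
    intro B h
    rw [List.cons_append, pvOuter_cons, pvOuter_cons]
    congr 1
    exact ih _ (fun b hb => h b (pvInner_mem a B b hb))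

-- the largest pair (x beaten by y) contributes exactly one to the forward count
theorem pvPairMax (A2 : List Int) (x y : Int) (hx : ∀ a ∈ A2, a ≤ x) (hxy : x < y) :
    ∀ B2 : List Int, (∀ b ∈ B2, b ≤ y) →
      pvOuter (A2 ++ [x]) (B2 ++ [y]) = 1 + pvOuter A2 B2 := by
  induction A2 with
  | nil =>
    intro B2 hy
    simp only [List.nil_append]
    rw [pvOuter_cons]
    have h1 : (pvInner x (B2 ++ [y])).1 = true :=
      pvInner_true x _ ⟨y, by simp, hxy⟩
    rw [h1]
    simp [pvOuter]
  | cons a as ih =>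
    intro B2 hy
    have hax : a ≤ x := hx a (by simp)
    have hx' : ∀ a' ∈ as, a' ≤ x := fun a' ha' => hx a' (List.mem_cons_of_mem _ ha')
    cases hfound : (pvInner a B2).1 with
    | true =>
      rw [List.cons_append, pvOuter_cons, pvInner_append_of_true a B2 [y] hfound]
      rw [pvOuter_cons, hfound]
      rw [ih hx' _ (fun b hb => hy b (pvInner_mem a B2 b hb))]
      simp
    | false =>
      rw [List.cons_append, pvOuter_cons, pvInner_append_of_false a B2 [y] hfound]
      have hy' : a < y := lt_of_le_of_lt hax hxy
      have h1 : pvInner a [y] = (true, []) := by simp [pvInner, hy']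
      rw [h1, pvOuter_cons, hfound, pvInner_snd_nil_of_false a B2 hfound]
      rw [pvOuter_nil_right, pvOuter_nil_right]
      simp

-- forward greedy on the ascending lists = backward greedy on the descending lists
theorem pvMain (Ad : List Int) :
    ∀ Bd : List Int, Ad.Pairwise (fun p q => q ≤ p) → Bd.Pairwise (fun p q => q ≤ p) →
      pvOuter Ad.reverse Bd.reverse = pvBack Ad Bd := by
  induction Ad with
  | nil => intro Bd _ _; simp [pvOuter, pvBack]
  | cons x as ih =>
    intro Bd hA hB
    have hxas : ∀ a ∈ as, a ≤ x := (List.pairwise_cons.1 hA).1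
    have has : as.Pairwise (fun p q => q ≤ p) := (List.pairwise_cons.1 hA).2
    cases Bd with
    | nil => simp [pvOuter_nil_right, pvBack]
    | cons y bs =>
      have hybs : ∀ b ∈ bs, b ≤ y := (List.pairwise_cons.1 hB).1
      have hbs : bs.Pairwise (fun p q => q ≤ p) := (List.pairwise_cons.1 hB).2
      simp only [List.reverse_cons]
      by_cases hxy : x < y
      · rw [pvPairMax as.reverse x y (by simpa using hxas) hxy bs.reverse (by simpa using hybs)]
        rw [ih bs has hbs]
        simp [pvBack, hxy]
      · rw [pvDropMax as.reverse x (bs.reverse ++ [y])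
              (by intro b hb
                  rcases List.mem_append.1 hb with hb' | hb'
                  · exact le_trans (hybs b (by simpa using hb')) (not_lt.1 hxy)
                  · simp at hb'; omega)]
        have := ih (y :: bs) has hB
        simp only [List.reverse_cons] at this
        rw [this]
        simp [pvBack, hxy]

-- B's fold computes the backward greedy count
theorem pvFold (l : List Int) :
    ∀ (c : Int) (bs : List Int), (l.foldl pvAltStep (c, bs)).1 = c + pvBack l bs := by
  induction l with
  | nil => intro c bs; simp [pvBack]
  | cons a l' ih =>
    intro c bs
    cases bs with
    | nil =>
      simp only [List.foldl_cons, pvAltStep]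
      rw [ih, pvBack_nil_right, pvBack_nil_right]
    | cons b bs' =>
      by_cases h : a < b
      · simp only [List.foldl_cons, pvAltStep, if_pos h]
        rw [ih]
        simp [pvBack, h]; omega
      · simp only [List.foldl_cons, pvAltStep, if_neg h]
        rw [ih]
        simp [pvBack, h]

-- ===== VERDICT (by name: the statement is the Claim_ definition above) =====
theorem solution_spec : Claim_equal_solution := by
  intro A B _
  unfold Spec_solution solution solution_alt
  set sA := PySem.List.sorted A (fun x => x) false with hsA
  set sB := PySem.List.sorted B (fun x => x) false with hsB
  rw [pvFold]
  have hA : sA.reverse.Pairwise (fun p q => q ≤ p) := by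
    rw [List.pairwise_reverse]
    exact PySem.List.sorted_pairwise A (fun x => x)
  have hB : sB.reverse.Pairwise (fun p q => q ≤ p) := by
    rw [List.pairwise_reverse]
    exact PySem.List.sorted_pairwise B (fun x => x)
  have := pvMain sA.reverse sB.reverse hA hB
  simp only [List.reverse_reverse] at this
  rw [this]
  ring
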